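-- pv_equiv track=rewrite | github.com/cuappdev/eatery-backend-v2 | api/dfg/ExternalEateries.py | generate_payment_methods
-- ===== SOURCE A (Python) =====
-- def generate_payment_methods(json_paymethods: list):
--     payment_methods = []
--     takes_cash = True
--     takes_brbs = any([method["descrshort"] == "Meal Plan - Debit" for method in json_paymethods])
--     takes_swipes = any([method["descrshort"] == "Meal Plan - Swipe" for method in json_paymethods])
--     if takes_cash:
--         payment_methods.append("cash")
--     if takes_brbs:
--         payment_methods.append("brbs")
--     if takes_swipes:
--         payment_methods.append("swipes")
--     return payment_methods
-- ===== SOURCE B (Python) =====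
-- TAGS = {"Meal Plan - Debit": "brbs", "Meal Plan - Swipe": "swipes"}
--
-- def generate_payment_methods(json_paymethods: list):
--     found = set()
--     for method in json_paymethods:
--         tag = TAGS.get(method["descrshort"])
--         if tag is not None:
--             found.add(tag)
--     return ["cash"] + sorted(found)
-- ===== Notes on version B (the rewrite author's own statement) =====
-- stated objective: alternative
-- what changed: B is table-driven: one loop looks each descrshort up in a descr-to-tag dict and accumulates the matching tags in a set, then emits 'cash' plus the sorted tags, instead of A's two separate any() scans followed by a chain of conditional appends.
import Mathlib
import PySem

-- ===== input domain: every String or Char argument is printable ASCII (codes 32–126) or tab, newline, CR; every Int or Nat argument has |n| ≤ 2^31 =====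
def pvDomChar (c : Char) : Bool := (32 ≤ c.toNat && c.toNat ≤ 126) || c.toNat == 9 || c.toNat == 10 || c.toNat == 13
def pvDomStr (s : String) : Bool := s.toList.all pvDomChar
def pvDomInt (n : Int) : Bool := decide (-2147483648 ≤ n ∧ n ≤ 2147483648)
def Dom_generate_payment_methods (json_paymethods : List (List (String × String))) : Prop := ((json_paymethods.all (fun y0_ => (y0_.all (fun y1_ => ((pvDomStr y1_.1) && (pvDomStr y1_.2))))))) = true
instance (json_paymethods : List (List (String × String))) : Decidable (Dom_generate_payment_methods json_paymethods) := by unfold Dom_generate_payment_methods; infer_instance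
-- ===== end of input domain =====

-- B is table-driven: one loop maps each descrshort through a descr→tag dict into a set, then emits "cash" + sorted(tags); A does two any() scans and a chain of conditional appends.

-- ===== PORT A =====
-- method["descrshort"]: dict lookup, with "" standing in where Python would raise KeyError (excluded by Pre_)
def pvDescr (m : List (String × String)) : String :=
  (PySem.Dict.ofList m).getD "descrshort" ""

def generate_payment_methods (json_paymethods : List (List (String × String))) : List String :=
  let payment_methods : List String := []
  let takes_cash := true
  let takes_brbs := (json_paymethods.map (fun m => pvDescr m == "Meal Plan - Debit")).any id
  let takes_swipes := (json_paymethods.map (fun m => pvDescr m == "Meal Plan - Swipe")).any id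
  let payment_methods := if takes_cash then payment_methods ++ ["cash"] else payment_methods
  let payment_methods := if takes_brbs then payment_methods ++ ["brbs"] else payment_methods
  let payment_methods := if takes_swipes then payment_methods ++ ["swipes"] else payment_methods
  payment_methods

-- ===== PORT B =====
-- TAGS.get(d): lookup in the module-level descr→tag dict
def pvTagOf (d : String) : Option String :=
  (PySem.Dict.ofList [("Meal Plan - Debit", "brbs"), ("Meal Plan - Swipe", "swipes")]).get? d

def generate_payment_methods_alt (json_paymethods : List (List (String × String))) : List String :=
  let found : PySem.Set String :=
    json_paymethods.foldl (fun s m =>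
      match pvTagOf (pvDescr m) with
      | some t => PySem.Set.add s t
      | none => s) PySem.Set.empty
  ["cash"] ++ PySem.List.sorted found (fun x => x) false

-- ===== PRECONDITION & SPEC =====
-- Pre_ excludes exactly the inputs where some entry lacks the "descrshort" key: there Python A (and B) raises KeyError.
def Pre_generate_payment_methods (json_paymethods : List (List (String × String))) : Prop :=
  (json_paymethods.all (fun m => m.any (fun p => p.1 == "descrshort"))) = true
instance (json_paymethods : List (List (String × String))) : Decidable (Pre_generate_payment_methods json_paymethods) := by unfold Pre_generate_payment_methods; infer_instance

def pvWitness_generate_payment_methods : (List (List (String × String))) :=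
  [[("descrshort", "Meal Plan - Debit")], [("descrshort", "Cash")]]

def Spec_generate_payment_methods (json_paymethods : List (List (String × String))) (out : List String) : Prop := out = generate_payment_methods_alt json_paymethods
instance (json_paymethods : List (List (String × String))) (out : List String) : Decidable (Spec_generate_payment_methods json_paymethods out) := by unfold Spec_generate_payment_methods; infer_instance

-- ===== CLAIM (what is proved, stated in full; the proofs are below) =====
def Claim_equal_generate_payment_methods : Prop := ∀ (json_paymethods : List (List (String × String))), Dom_generate_payment_methods json_paymethods → Pre_generate_payment_methods json_paymethods → Spec_generate_payment_methods json_paymethods (generate_payment_methods json_paymethods)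

-- ===== LEMMAS AND PROOFS =====

-- B's loop body, named for the proofs
def pvStep (s : PySem.Set String) (m : List (String × String)) : PySem.Set String :=
  match pvTagOf (pvDescr m) with
  | some t => PySem.Set.add s t
  | none => s

lemma pvTagOf_cases (d : String) :
    pvTagOf d = if d = "Meal Plan - Debit" then some "brbs"
      else if d = "Meal Plan - Swipe" then some "swipes" else none := by
  rcases eq_or_ne d "Meal Plan - Debit" with rfl | h1
  · rfl
  rcases eq_or_ne d "Meal Plan - Swipe" with rfl | h2
  · rfl
  have e1 : ("Meal Plan - Debit" == d) = false := beq_eq_false_iff_ne.mpr (Ne.symm h1)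
  have e2 : ("Meal Plan - Swipe" == d) = false := beq_eq_false_iff_ne.mpr (Ne.symm h2)
  simp only [pvTagOf, PySem.Dict.ofList, PySem.Dict.get?, PySem.Dict.update, PySem.Dict.insert,
    PySem.Dict.empty, List.foldl]
  simp [h1, h2]
  exact ⟨fun h => h1 h.symm, fun h => h2 h.symm⟩

lemma loop_inv (l : List (List (String × String))) (s : List String)
    (hs : s = [] ∨ s = ["brbs"] ∨ s = ["swipes"] ∨ s = ["brbs", "swipes"] ∨ s = ["swipes", "brbs"]) :
    (l.foldl pvStep s = [] ∨ l.foldl pvStep s = ["brbs"] ∨ l.foldl pvStep s = ["swipes"] ∨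
      l.foldl pvStep s = ["brbs", "swipes"] ∨ l.foldl pvStep s = ["swipes", "brbs"]) ∧
    ("brbs" ∈ l.foldl pvStep s ↔ "brbs" ∈ s ∨ ∃ m ∈ l, pvDescr m = "Meal Plan - Debit") ∧
    ("swipes" ∈ l.foldl pvStep s ↔ "swipes" ∈ s ∨ ∃ m ∈ l, pvDescr m = "Meal Plan - Swipe") := by
  induction l generalizing s with
  | nil => exact ⟨hs, by simp, by simp⟩
  | cons m t ih =>
    have hstep : pvStep s m = [] ∨ pvStep s m = ["brbs"] ∨ pvStep s m = ["swipes"] ∨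
        pvStep s m = ["brbs", "swipes"] ∨ pvStep s m = ["swipes", "brbs"] := by
      unfold pvStep
      rw [pvTagOf_cases]
      rcases hs with h | h | h | h | h <;> subst h <;>
        split_ifs <;> simp [PySem.Set.add, PySem.Set.contains]
    have hmb : "brbs" ∈ pvStep s m ↔ "brbs" ∈ s ∨ pvDescr m = "Meal Plan - Debit" := by
      unfold pvStep
      rw [pvTagOf_cases]
      split_ifs with h1 h2 <;> simp [PySem.Set.mem_add, *]
    have hms : "swipes" ∈ pvStep s m ↔ "swipes" ∈ s ∨ pvDescr m = "Meal Plan - Swipe" := by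
      unfold pvStep
      rw [pvTagOf_cases]
      split_ifs with h1 h2 <;> simp [PySem.Set.mem_add, *]
    obtain ⟨r1, r2, r3⟩ := ih (pvStep s m) hstep
    refine ⟨by simpa using r1, ?_, ?_⟩
    · rw [List.foldl_cons, r2, hmb]
      constructor
      · rintro (⟨h | h⟩ | ⟨x, hx, he⟩)
        · exact Or.inl h
        · exact Or.inr ⟨m, by simp, h⟩
        · exact Or.inr ⟨x, by simp [hx], he⟩
      · rintro (h | ⟨x, hx, he⟩)
        · exact Or.inl (Or.inl h)
        · rcases List.mem_cons.mp hx with rfl | hx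
          · exact Or.inl (Or.inr he)
          · exact Or.inr ⟨x, hx, he⟩
    · rw [List.foldl_cons, r3, hms]
      constructor
      · rintro (⟨h | h⟩ | ⟨x, hx, he⟩)
        · exact Or.inl h
        · exact Or.inr ⟨m, by simp, h⟩
        · exact Or.inr ⟨x, by simp [hx], he⟩
      · rintro (h | ⟨x, hx, he⟩)
        · exact Or.inl (Or.inl h)
        · rcases List.mem_cons.mp hx with rfl | hx
          · exact Or.inl (Or.inr he)
          · exact Or.inr ⟨x, hx, he⟩

lemma sorted_pair : PySem.List.sorted ["swipes", "brbs"] (fun x => x) false = ["brbs", "swipes"] := by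
  apply PySem.List.sorted_id_eq_of_perm_of_pairwise
  · exact List.Perm.swap _ _ _
  · simp
    decide

lemma sorted_pair' : PySem.List.sorted ["brbs", "swipes"] (fun x => x) false = ["brbs", "swipes"] := by
  apply PySem.List.sorted_id_eq_of_perm_of_pairwise
  · exact List.Perm.refl _
  · simp
    decide

lemma sorted_single (x : String) : PySem.List.sorted [x] (fun y => y) false = [x] := by
  apply PySem.List.sorted_id_eq_of_perm_of_pairwise
  · exact List.Perm.refl _
  · simp

lemma sorted_nil : PySem.List.sorted ([] : List String) (fun y => y) false = [] := by
  apply PySem.List.sorted_id_eq_of_perm_of_pairwise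
  · exact List.Perm.refl _
  · simp

lemma any_eq_exists (l : List (List (String × String))) (v : String) :
    (l.map (fun m => pvDescr m == v)).any id = decide (∃ m ∈ l, pvDescr m = v) := by
  rw [Bool.eq_iff_iff]
  simp

-- ===== VERDICT (by name: the statement is the Claim_ definition above) =====
theorem generate_payment_methods_spec : Claim_equal_generate_payment_methods := by
  intro l _ _
  show _ = _
  unfold generate_payment_methods generate_payment_methods_alt
  have hfold : (l.foldl (fun s m =>
      match pvTagOf (pvDescr m) with
      | some t => PySem.Set.add s t
      | none => s) PySem.Set.empty) = l.foldl pvStep [] := rfl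
  obtain ⟨h5, hb, hs⟩ := loop_inv l [] (Or.inl rfl)
  simp only [hfold, any_eq_exists, List.not_mem_nil, false_or] at *
  rcases h5 with h | h | h | h | h <;> rw [h] at hb hs ⊢ <;>
    simp only [List.mem_cons, List.not_mem_nil] at hb hs <;>
    simp [← hb, ← hs, sorted_pair, sorted_pair', sorted_single, sorted_nil]
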